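-- pv_equiv track=rewrite | github.com/SNHillar/UTN-TpI2Maths | TPIntegrador2Maths/functions.py | diferencias
-- ===== SOURCE A (Python) =====
-- def diferencias(lista_dni):
--     conjunto_diferencias = set()
--     #recorremos la lista de DNI y agregamos los dígitos únicos a un conjunto
--     for i in range(len(lista_dni)):
--         conjunto_digitos = set(lista_dni[i])
--         if i == 0:
--             conjunto_diferencias = conjunto_digitos
--         else:
--             conjunto_diferencias.difference_update(conjunto_digitos)
--     return conjunto_diferencias
-- ===== SOURCE B (Python) =====
-- def diferencias(lista_dni):
--     if not lista_dni:
--         return set()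
--     resto = lista_dni[1:]
--     return {c for c in lista_dni[0] if all(c not in dni for dni in resto)}
-- ===== Notes on version B (the rewrite author's own statement) =====
-- stated objective: alternative
-- what changed: Replaces A's running set with per-iteration difference_update by a set comprehension that filters the first entry's characters directly, keeping a character only if a short-circuiting all(...) substring scan finds it in no later entry; no per-entry sets are built at all.
import Mathlib
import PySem

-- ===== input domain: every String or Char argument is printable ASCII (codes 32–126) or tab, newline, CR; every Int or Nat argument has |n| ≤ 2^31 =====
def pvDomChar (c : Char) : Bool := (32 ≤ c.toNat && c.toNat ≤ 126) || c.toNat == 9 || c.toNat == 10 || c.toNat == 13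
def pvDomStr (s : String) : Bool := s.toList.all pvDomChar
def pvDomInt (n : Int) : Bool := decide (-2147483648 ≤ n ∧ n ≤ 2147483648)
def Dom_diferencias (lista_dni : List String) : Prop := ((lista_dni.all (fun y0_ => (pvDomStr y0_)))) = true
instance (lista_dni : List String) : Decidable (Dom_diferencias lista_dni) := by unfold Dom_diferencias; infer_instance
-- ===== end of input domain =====

-- B filters the characters of the first entry directly, keeping each one only if an `all` scan
-- finds it in no later entry — no set algebra at all, instead of A's running set with
-- per-iteration difference_update (objective: alternative).


-- set(s) for a string s: the distinct characters of s, as 1-character strings (A's helper)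
def charSet (s : String) : PySem.Set String :=
  PySem.Set.ofList (s.toList.map (fun c => String.ofList [c]))

-- ===== PORT A =====
def diferencias (lista_dni : List String) : List String :=
  (PySem.List.pyRange 0 (PySem.List.len lista_dni) 1).foldl
    (fun conjunto_diferencias i =>
      let conjunto_digitos := charSet (PySem.List.pyGetD lista_dni i "")
      if i == 0 then conjunto_digitos
      else PySem.Set.diff conjunto_diferencias conjunto_digitos)
    PySem.Set.empty

-- ===== PORT B =====
-- {c for c in lista_dni[0] if all(c not in dni for dni in resto)}: iterating a Python string
-- yields its characters as 1-char strings, hence the map to String.ofList [c].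
def diferencias_alt (lista_dni : List String) : List String :=
  match lista_dni with
  | [] => PySem.Set.empty
  | primero :: resto =>
    PySem.Set.ofList
      ((primero.toList.map (fun c => String.ofList [c])).filter
        (fun c => resto.all (fun dni => !(PySem.Str.isIn c dni))))

-- ===== PRECONDITION & SPEC =====
def Spec_diferencias (lista_dni : List String) (out : List String) : Prop := out = diferencias_alt lista_dni
instance (lista_dni : List String) (out : List String) : Decidable (Spec_diferencias lista_dni out) := by unfold Spec_diferencias; infer_instance

-- ===== CLAIM (what is proved, stated in full; the proofs are below) =====
def Claim_equal_diferencias : Prop := ∀ (lista_dni : List String), Dom_diferencias lista_dni → Spec_diferencias lista_dni (diferencias lista_dni)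

-- ===== LEMMAS AND PROOFS =====

-- membership in the union accumulator (the tail's digits, gathered by Set.update)
lemma mem_foldl_update (l : List String) (u : List String) (x : String) :
    x ∈ l.foldl (fun s d => PySem.Set.update s ((charSet d : List String))) u ↔
      x ∈ u ∨ ∃ d ∈ l, x ∈ charSet d := by
  induction l generalizing u with
  | nil => simp
  | cons d l ih =>
    simp only [List.foldl_cons, ih, PySem.Set.mem_update, List.mem_cons]
    constructor
    · rintro (⟨h | h⟩ | ⟨e, he, hx⟩)
      · exact Or.inl h
      · exact Or.inr ⟨d, Or.inl rfl, h⟩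
      · exact Or.inr ⟨e, Or.inr he, hx⟩
    · rintro (h | ⟨e, rfl | he, hx⟩)
      · exact Or.inl (Or.inl h)
      · exact Or.inl (Or.inr hx)
      · exact Or.inr ⟨e, he, hx⟩

-- Set.diff s a then diff by b equals one diff by any set with the union's membership
lemma diff_diff (s a b c : List String) (h : ∀ x, x ∈ c ↔ x ∈ a ∨ x ∈ b) :
    PySem.Set.diff (PySem.Set.diff s a) b = PySem.Set.diff s c := by
  simp only [PySem.Set.diff, List.filter_filter]
  apply List.filter_congr
  intro x _
  simp only [PySem.Set.contains_eq_listContains]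
  by_cases hc : x ∈ c <;> by_cases ha : x ∈ a <;> by_cases hb : x ∈ b <;>
    simp_all [h x]

-- A's chain of differences equals one difference by the union of the tail
lemma foldl_diff_eq (l : List String) (s : List String) :
    l.foldl (fun acc d => PySem.Set.diff acc (charSet d)) s =
      PySem.Set.diff s (l.foldl (fun u d => PySem.Set.update u ((charSet d : List String))) PySem.Set.empty) := by
  induction l generalizing s with
  | nil =>
    simp [PySem.Set.diff, PySem.Set.empty]
  | cons d l ih =>
    simp only [List.foldl_cons]
    rw [ih]
    apply diff_diff
    intro x
    rw [mem_foldl_update, mem_foldl_update]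
    simp [PySem.Set.mem_update]

-- one Set.add step under a filter
lemma filter_add_pos {α : Type} [BEq α] [LawfulBEq α] (p : α → Bool) (u : List α) (a : α) (hp : p a = true) :
    List.filter p (PySem.Set.add u a) = PySem.Set.add (List.filter p u) a := by
  rw [PySem.Set.add, PySem.Set.add]
  rw [PySem.Set.contains_eq_listContains, PySem.Set.contains_eq_listContains]
  rw [show (List.filter p u).contains a = u.contains a from by
    rw [Bool.eq_iff_iff]; simp [List.mem_filter, hp]]
  split <;> simp [List.filter_append, hp]

lemma filter_add_neg {α : Type} [BEq α] [LawfulBEq α] (p : α → Bool) (u : List α) (a : α) (hp : p a = false) :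
    List.filter p (PySem.Set.add u a) = List.filter p u := by
  rw [PySem.Set.add]
  split <;> simp [List.filter_append, hp]

-- filtering commutes with first-occurrence dedup (Set.ofList = foldl Set.add)
lemma filter_foldl_add {α : Type} [BEq α] [LawfulBEq α] (p : α → Bool) (m : List α) (u : List α) :
    (m.foldl PySem.Set.add u).filter p = (m.filter p).foldl PySem.Set.add (u.filter p) := by
  induction m generalizing u with
  | nil => rfl
  | cons a m ih =>
    simp only [List.foldl_cons, List.filter_cons]
    by_cases hp : p a = true
    · rw [hp, ih, filter_add_pos p u a hp]
      simp
    · simp only [Bool.not_eq_true] at hp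
      rw [hp, ih, filter_add_neg p u a hp]
      simp

lemma filter_ofList {α : Type} [BEq α] [LawfulBEq α] (p : α → Bool) (m : List α) :
    (PySem.Set.ofList m).filter p = PySem.Set.ofList (m.filter p) := by
  rw [PySem.Set.ofList, PySem.Set.ofList, filter_foldl_add]
  rfl

-- a single char is a substring iff it is one of the characters
lemma isIn_singleton (c : Char) (l : List Char) :
    PySem.Chars.isIn [c] l = true ↔ c ∈ l := by
  rw [PySem.Chars.isIn_iff_infix]
  exact List.singleton_infix_iff c l

-- σ c membership in a charSet is char membership
lemma mem_charSet (c : Char) (d : String) :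
    String.ofList [c] ∈ charSet d ↔ c ∈ d.toList := by
  unfold charSet
  rw [PySem.Set.mem_ofList]
  simp [List.mem_map, String.ofList_inj]

theorem diferencias_eq (lista_dni : List String) :
    diferencias lista_dni = diferencias_alt lista_dni := by
  cases lista_dni with
  | nil => rfl
  | cons primero resto =>
    unfold diferencias diferencias_alt
    rw [PySem.List.pyRange_one_cons (by simp)]
    rw [List.foldl_cons]
    simp only [beq_self_eq_true, if_true, PySem.List.pyGetD_zero_cons]
    rw [PySem.List.foldl_congr_mem _ _
        (fun acc i => PySem.Set.diff acc (charSet (PySem.List.pyGetD (primero :: resto) i "")))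
        (charSet primero)
        (by
          intro acc i hi
          have hge := (PySem.List.mem_pyRange_one.mp hi).1
          simp only [beq_iff_eq]
          rw [if_neg (by omega)])]
    rw [zero_add]
    rw [PySem.List.foldl_pyRange_pyGetD (primero :: resto) ""
        (fun acc s => PySem.Set.diff acc (charSet s)) (charSet primero) (a := 1) (by omega)]
    simp only [Int.toNat_one, List.drop_succ_cons, List.drop_zero]
    rw [foldl_diff_eq resto (charSet primero)]
    -- LHS: Set.diff (charSet primero) U; RHS: B's filtered dedup
    rw [PySem.Set.diff, charSet, filter_ofList]
    congr 1
    apply List.filter_congr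
    intro x hx
    obtain ⟨c, hc, rfl⟩ := List.mem_map.mp hx
    simp only [PySem.Set.contains_eq_listContains]
    by_cases h : ∃ d ∈ resto, c ∈ d.toList
    · have hmem : String.ofList [c] ∈ resto.foldl (fun u d => PySem.Set.update u ((charSet d : List String))) PySem.Set.empty := by
        rw [mem_foldl_update]
        obtain ⟨d, hd, hcd⟩ := h
        exact Or.inr ⟨d, hd, (mem_charSet c d).mpr hcd⟩
      rw [show List.contains (resto.foldl (fun u d => PySem.Set.update u ((charSet d : List String))) PySem.Set.empty) (String.ofList [c]) = true from List.contains_iff_mem.mpr hmem]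
      symm
      simp only [Bool.not_true]
      obtain ⟨d, hd, hcd⟩ := h
      refine List.all_eq_false.mpr ⟨d, hd, ?_⟩
      simp [isIn_singleton, hcd]
    · push Not at h
      have hmem : String.ofList [c] ∉ resto.foldl (fun u d => PySem.Set.update u ((charSet d : List String))) PySem.Set.empty := by
        rw [mem_foldl_update]
        rintro (h0 | ⟨d, hd, hcd⟩)
        · simp [PySem.Set.empty] at h0
        · exact h d hd ((mem_charSet c d).mp hcd)
      rw [show List.contains (resto.foldl (fun u d => PySem.Set.update u ((charSet d : List String))) PySem.Set.empty) (String.ofList [c]) = false from by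
        rw [← Bool.not_eq_true, List.contains_iff_mem]; exact hmem]
      symm
      simp only [Bool.not_false]
      refine List.all_eq_true.mpr ?_
      intro d hd
      simp only [Bool.not_eq_true', ← Bool.not_eq_true, PySem.Str.isIn_eq,
        String.toList_ofList, isIn_singleton]
      exact h d hd

-- ===== VERDICT (by name: the statement is the Claim_ definition above) =====
theorem diferencias_spec : Claim_equal_diferencias := by
  intro l _
  unfold Spec_diferencias
  exact diferencias_eq l
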